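-- pv_equiv track=rewrite | github.com/owendabestone/Name-Entity-Recognition-Project | util.py | is_dim
-- ===== SOURCE A (Python) =====
-- def is_dim(word):
--     markings = ['x','X']
--
--
--
--     for marking in markings:
--         parts = word.split(marking)
--         switch = True
--         if len(parts)<2:
--             switch = False
--         else:
--             for i in parts:
--                 if not i.isnumeric() and i != '':
--                     switch = False
--         if switch == True:
--
--             return True
--     return False
-- ===== SOURCE B (Python) =====
-- def is_dim(word):
--     # Single pass per marking: a split-part is numeric-or-empty iff every one of
--     # its characters is numeric, and len(parts) >= 2 iff the marking occurs.
--     for m in ('x', 'X'):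
--         if m in word and all(c == m or c.isnumeric() for c in word):
--             return True
--     return False
-- ===== Notes on version B (the rewrite author's own statement) =====
-- stated objective: simpler
-- what changed: Replaces building the split-parts list and scanning each part with a single character scan per marking: the marking must occur and every character must be the marking or numeric.
import Mathlib
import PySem

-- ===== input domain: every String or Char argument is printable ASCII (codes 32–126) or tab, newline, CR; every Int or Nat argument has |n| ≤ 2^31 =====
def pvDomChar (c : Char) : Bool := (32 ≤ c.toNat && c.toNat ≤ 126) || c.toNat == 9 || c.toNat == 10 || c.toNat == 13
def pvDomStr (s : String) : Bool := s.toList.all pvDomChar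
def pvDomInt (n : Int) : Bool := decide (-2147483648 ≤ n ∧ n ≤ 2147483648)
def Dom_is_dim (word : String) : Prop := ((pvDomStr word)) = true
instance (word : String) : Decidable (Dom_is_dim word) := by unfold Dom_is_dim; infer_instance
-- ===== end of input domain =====

-- B replaces A's split-into-parts-and-scan-each-part with one character scan per marking;
-- objective: simpler. ('.isnumeric()' ported as the digit check, exact on the ASCII domain.)

-- ===== PORT A =====
-- body of A's 'for marking in markings' loop: split on the marking, then check the parts
def is_dim_try (word : String) (marking : String) : Bool :=
  let parts := (PySem.Str.split? word marking).getD []   -- marking ≠ "" here, so split? is 'some'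
  if parts.length < 2 then false
  else parts.foldl (fun sw i =>
    if !(PySem.Str.strIsdigit i) && !(i == "") then false else sw) true

-- the loop over markings with early return on switch == True
def is_dim_go (word : String) : List String → Bool
  | [] => false
  | m :: rest => if is_dim_try word m then true else is_dim_go word rest

def is_dim (word : String) : Bool := is_dim_go word ["x", "X"]

-- ===== PORT B =====
-- Source B's per-marking test: 'm in word and all(c == m or c.isnumeric() for c in word)'
-- (m is a single character, so Python's substring test 'm in word' is char membership)
def is_dim_alt_try (word : String) (m : Char) : Bool :=
  word.toList.contains m && word.toList.all (fun c => c == m || PySem.Chars.isdigit c)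

-- the two-element "for m in ('x', 'X')" loop with early return
def is_dim_alt (word : String) : Bool :=
  if is_dim_alt_try word 'x' then true
  else if is_dim_alt_try word 'X' then true
  else false

-- ===== PRECONDITION & SPEC =====
def Spec_is_dim (word : String) (out : Bool) : Prop := out = is_dim_alt word
instance (word : String) (out : Bool) : Decidable (Spec_is_dim word out) := by unfold Spec_is_dim; infer_instance

-- ===== CLAIM (what is proved, stated in full; the proofs are below) =====
def Claim_equal_is_dim : Prop := ∀ (word : String), Dom_is_dim word → Spec_is_dim word (is_dim word)

-- ===== LEMMAS AND PROOFS =====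

-- structural single-character split of a char list: (head part, remaining parts)
def splitCh (m : Char) : List Char → List Char × List (List Char)
  | [] => ([], [])
  | c :: rest =>
    let p := splitCh m rest
    if c = m then ([], p.1 :: p.2) else (c :: p.1, p.2)

theorem splitOn_go_single (m : Char) (fuel : Nat) (l cur : List Char)
    (acc : List (List Char)) (h : l.length ≤ fuel) :
    PySem.Chars.splitOn.go [m] fuel l cur acc
      = acc.reverse ++ (cur.reverse ++ (splitCh m l).1) :: (splitCh m l).2 := by
  induction fuel generalizing l cur acc with
  | zero =>
    have hl : l = [] := List.length_eq_zero_iff.mp (Nat.le_zero.mp h)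
    subst hl
    simp [PySem.Chars.splitOn.go, splitCh]
  | succ n ih =>
    cases l with
    | nil => simp [PySem.Chars.splitOn.go, splitCh]
    | cons c rest =>
      rw [PySem.Chars.splitOn.go]
      have hpre : List.isPrefixOf [m] (c :: rest) = (m == c) := by
        simp [List.isPrefixOf]
      rw [hpre]
      by_cases hc : m = c
      · rw [if_pos (by simp [hc])]
        rw [ih _ _ _ (Nat.le_of_succ_le_succ (by simpa using h))]
        simp [splitCh, ← hc]
      · rw [if_neg (by simp [hc])]
        rw [ih rest (c :: cur) acc (Nat.le_of_succ_le_succ (by simpa using h))]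
        simp [splitCh, Ne.symm hc]

theorem splitOn_single (m : Char) (s : List Char) :
    PySem.Chars.splitOn s [m] = (splitCh m s).1 :: (splitCh m s).2 := by
  unfold PySem.Chars.splitOn
  rw [splitOn_go_single m (s.length + 1) s [] [] (Nat.le_succ _)]
  simp

-- the tail of the split is nonempty exactly when the marking occurs
theorem splitCh_snd_ne_nil (m : Char) (s : List Char) :
    ((splitCh m s).2 ≠ []) ↔ m ∈ s := by
  induction s with
  | nil => simp [splitCh]
  | cons c rest ih =>
    by_cases hc : c = m
    · simp [splitCh, hc]
    · simp [splitCh, hc, ih, Ne.symm hc]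

-- every part is numeric-or-empty iff every character of s is the marking or a digit
theorem splitCh_all (m : Char) (s : List Char) :
    (((splitCh m s).1 :: (splitCh m s).2).all
        (fun p => PySem.Chars.strIsdigit p || p.isEmpty))
      = s.all (fun c => c == m || PySem.Chars.isdigit c) := by
  induction s with
  | nil => simp [splitCh, PySem.Chars.strIsdigit]
  | cons c rest ih =>
    by_cases hc : c = m
    · simp only [splitCh, hc, if_true]
      simp only [List.all_cons] at ih ⊢
      simp [PySem.Chars.strIsdigit, ← ih]
    · have hcne : (c == m) = false := by simp [hc]
      simp only [splitCh, if_neg hc]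
      simp only [List.all_cons] at ih ⊢
      by_cases hd : PySem.Chars.isdigit c
      · simp only [PySem.Chars.strIsdigit] at ih ⊢
        cases hfst : (splitCh m rest).1 with
        | nil =>
          rw [hfst] at ih
          simp only [List.isEmpty_nil, List.isEmpty_cons] at ih ⊢
          simp only [List.all_cons, hd]
          simp [← ih, hcne]
        | cons a as =>
          rw [hfst] at ih
          simp only [List.all_cons, List.isEmpty_cons] at ih ⊢
          simp [← ih, hcne, hd]
      · have hcm : (c == m || PySem.Chars.isdigit c) = false := by
          simp [hd, hc]
        simp [hcne, PySem.Chars.strIsdigit, hd]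

-- A's switch loop computes 'all parts pass'
theorem foldl_switch (P : String → Bool) (parts : List String) (b : Bool) :
    parts.foldl (fun sw i => if !(P i) then false else sw) b
      = (b && parts.all P) := by
  induction parts generalizing b with
  | nil => simp
  | cons p ps ih =>
    rw [List.foldl_cons, ih]
    by_cases hp : P p
    · simp [hp]
    · simp [hp]

theorem beq_empty_eq (i : String) : (i == "") = (i.toList == ([] : List Char)) := by
  rcases h : (i == "") with _ | _
  · have hne : i ≠ "" := by simpa using h
    have : i.toList ≠ [] := fun hn => hne (by rwa [String.toList_eq_nil_iff] at hn)
    simpa using this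
  · have : i = "" := by simpa using h
    subst this; rfl

-- the per-marking bodies agree (for a single-character marking)
theorem try_eq (word : String) (mk : String) (m : Char) (hmk : mk.toList = [m]) :
    is_dim_try word mk = is_dim_alt_try word m := by
  unfold is_dim_try is_dim_alt_try
  have hsplit := PySem.Str.split?_map word mk
  rw [PySem.Chars.split?, hmk, if_neg (by simp), splitOn_single] at hsplit
  rcases h : PySem.Str.split? word mk with _ | parts
  · rw [h] at hsplit; simp at hsplit
  rw [h] at hsplit
  simp only [Option.map_some, Option.some.injEq] at hsplit
  have hmap : parts.map String.toList
      = (splitCh m word.toList).1 :: (splitCh m word.toList).2 := hsplit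
  simp only [Option.getD_some]
  have hstep : (fun (sw : Bool) (i : String) =>
      if !(PySem.Str.strIsdigit i) && !(i == "") then false else sw)
      = (fun sw i => if !(PySem.Str.strIsdigit i || (i == "")) then false else sw) := by
    funext sw i
    by_cases h1 : PySem.Str.strIsdigit i <;> by_cases h2 : (i == "") <;> simp_all
  rw [hstep, foldl_switch (fun i => PySem.Str.strIsdigit i || (i == "")), Bool.true_and]
  have hall : parts.all (fun i => PySem.Str.strIsdigit i || (i == ""))
      = word.toList.all (fun c => c == m || PySem.Chars.isdigit c) := by
    rw [← splitCh_all m word.toList, ← hmap, List.all_map]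
    refine List.all_congr rfl fun i => ?_
    simp [Function.comp, PySem.Str.strIsdigit_eq, beq_empty_eq]
  have hlen : parts.length = ((splitCh m word.toList).2).length + 1 := by
    have := congrArg List.length hmap
    simpa using this
  by_cases hmem : m ∈ word.toList
  · have htail : (splitCh m word.toList).2 ≠ [] := (splitCh_snd_ne_nil m _).mpr hmem
    have h2 : ¬ parts.length < 2 := by
      rw [hlen]
      cases h : (splitCh m word.toList).2 with
      | nil => exact absurd h htail
      | cons a as => simp
    have hct : word.toList.contains m = true := List.contains_iff_mem.mpr hmem
    rw [if_neg h2, hall, hct, Bool.true_and]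
  · have htail : (splitCh m word.toList).2 = [] := by
      by_contra h; exact hmem ((splitCh_snd_ne_nil m _).mp h)
    have h2 : parts.length < 2 := by rw [hlen, htail]; simp
    have hct : word.toList.contains m = false := by
      simp only [List.contains_eq_mem]; simpa using hmem
    rw [if_pos h2, hct, Bool.false_and]

-- ===== VERDICT (by name: the statement is the Claim_ definition above) =====
theorem is_dim_spec : Claim_equal_is_dim := by
  intro word _
  unfold Spec_is_dim
  simp only [is_dim, is_dim_go, is_dim_alt,
    try_eq word "x" 'x' (by decide), try_eq word "X" 'X' (by decide)]
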